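-- pv_equiv track=rewrite | github.com/parkerledbetter/415-Python-Project | 415 Project 1/ParkerLedbetterAssignment1.py | hasSameNumElements
-- ===== SOURCE A (Python) =====
-- def hasSameNumElements(first, second):
--     """This function returns True if two arguments have the same number of elements."""
--     first_counter = 0
--     second_counter = 0
--     for i in first:
--         first_counter += 1
--     for i in second:
--         second_counter += 1
--     if first_counter == second_counter:
--         return True
--     else:
--         return False
-- ===== SOURCE B (Python) =====
-- def hasSameNumElements(first, second):
--     """This function returns True if two arguments have the same number of elements."""
--     it1, it2 = iter(first), iter(second)
--     sentinel = object()
--     while True: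
--         a = next(it1, sentinel)
--         b = next(it2, sentinel)
--         if a is sentinel:
--             return b is sentinel
--         if b is sentinel:
--             return False
-- ===== Notes on version B (the rewrite author's own statement) =====
-- stated objective: alternative
-- what changed: Instead of fully counting each iterable in two separate loops and comparing the counters, B walks both iterables simultaneously with a fresh sentinel fill value and decides as soon as one of them is exhausted.
import Mathlib
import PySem

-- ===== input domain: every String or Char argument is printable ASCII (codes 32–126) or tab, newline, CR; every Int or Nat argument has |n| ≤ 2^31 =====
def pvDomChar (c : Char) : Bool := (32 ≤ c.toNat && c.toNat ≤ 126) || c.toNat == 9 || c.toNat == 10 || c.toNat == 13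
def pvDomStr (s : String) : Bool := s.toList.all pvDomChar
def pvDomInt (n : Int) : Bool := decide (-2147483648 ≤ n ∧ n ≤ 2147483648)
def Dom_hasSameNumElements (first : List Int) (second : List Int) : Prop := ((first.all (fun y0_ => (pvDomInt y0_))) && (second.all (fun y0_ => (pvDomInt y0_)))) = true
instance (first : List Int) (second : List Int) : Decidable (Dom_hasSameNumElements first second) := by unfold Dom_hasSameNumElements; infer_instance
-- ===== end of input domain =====

-- B walks both lists in one interleaved pass with a sentinel instead of A's two counting loops; objective: alternative decomposition (early exit on the shorter list).


-- ===== PORT A =====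
-- two independent counting loops, then the comparison
def hasSameNumElements (first : List Int) (second : List Int) : Bool :=
  let first_counter := first.foldl (fun c _ => c + 1) (0 : Int)
  let second_counter := second.foldl (fun c _ => c + 1) (0 : Int)
  if first_counter = second_counter then true else false

-- ===== PORT B =====
-- interleaved walk: step both lists together; when one ends, the answer is whether the other ends too
def hasSameNumElements_alt (first : List Int) (second : List Int) : Bool :=
  match first, second with
  | [], rest => rest.isEmpty
  | _ :: _, [] => false
  | _ :: xs, _ :: ys => hasSameNumElements_alt xs ys

-- ===== PRECONDITION & SPEC =====
def Spec_hasSameNumElements (first : List Int) (second : List Int) (out : Bool) : Prop := out = hasSameNumElements_alt first second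
instance (first : List Int) (second : List Int) (out : Bool) : Decidable (Spec_hasSameNumElements first second out) := by unfold Spec_hasSameNumElements; infer_instance

-- ===== CLAIM (what is proved, stated in full; the proofs are below) =====
def Claim_equal_hasSameNumElements : Prop := ∀ (first : List Int) (second : List Int), Dom_hasSameNumElements first second → Spec_hasSameNumElements first second (hasSameNumElements first second)

-- ===== LEMMAS AND PROOFS =====

-- A's counting loop computes the length
theorem count_loop_eq_length (xs : List Int) (c : Int) :
    xs.foldl (fun c _ => c + 1) c = c + xs.length := by
  induction xs generalizing c with
  | nil => simp
  | cons x xs ih => simp [List.foldl, ih]; omega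

-- B's interleaved walk decides length equality
theorem alt_eq_length_eq (xs ys : List Int) :
    hasSameNumElements_alt xs ys = decide (xs.length = ys.length) := by
  induction xs generalizing ys with
  | nil => cases ys <;> simp [hasSameNumElements_alt, List.isEmpty]
  | cons x xs ih =>
    cases ys with
    | nil => simp [hasSameNumElements_alt]
    | cons y ys => simp [hasSameNumElements_alt, ih]

-- ===== VERDICT (by name: the statement is the Claim_ definition above) =====
theorem hasSameNumElements_spec : Claim_equal_hasSameNumElements := by
  intro first second _
  unfold Spec_hasSameNumElements hasSameNumElements
  simp [count_loop_eq_length, alt_eq_length_eq]
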